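-- pv_equiv track=rewrite | github.com/alp-oz/kcore-chain | diamond.py | index_to_partition
-- ===== SOURCE A (Python) =====
-- from math import factorial
--
-- def _normalize(p: tuple[int, ...]) -> tuple[int, ...]:
--     return tuple(sorted((x for x in p if x > 0), reverse=True))
--
-- def index_to_partition(m: int, k: int) -> tuple[int, ...]:
--     """
--     Decode an integer m in {0, ..., k!-1} to a k-bounded partition in R_k.
--     Inverse of partition_to_index.
--     """
--     if m == 0:
--         return ()
--     n = m % factorial(k)
--     A = [0] * (k + 1)              # A[i] = # parts of size k-i+1 (1-based)
--     for i in range(1, k):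
--         z = factorial(k) // factorial(i + 1)
--         A[i + 1] = n // z
--         n = n % z
--     parts = []
--     for i in range(1, k + 1):
--         parts.extend([k - i + 1] * A[i])
--     return _normalize(tuple(parts))
-- ===== SOURCE B (Python) =====
-- from math import factorial
--
-- def index_to_partition(m: int, k: int) -> tuple[int, ...]:
--     """
--     Decode an integer m in {0, ..., k!-1} to a k-bounded partition in R_k.
--
--     Same decode as A, but by successive divmod over the small descending
--     bases k, k-1, ..., 2 (no per-step factorial quotients); the digits are
--     collected least-significant-first and emitted in reverse, so no final
--     sort is needed.
--     """
--     if m == 0: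
--         return ()
--     n = m % factorial(k)
--     counts: list[tuple[int, int]] = []       # (part size, multiplicity), sizes ascending
--     for base in range(k, 1, -1):
--         n, c = divmod(n, base)
--         counts.append((k - base + 1, c))
--     parts: list[int] = []
--     for size, c in reversed(counts):
--         parts.extend([size] * c)
--     return tuple(parts)
-- ===== Notes on version B (the rewrite author's own statement) =====
-- stated objective: faster
-- what changed: Replaces the per-step big-integer factorial quotients (factorial(k)//factorial(i+1) recomputed in every iteration) and the final sort by a single successive-divmod loop over the small descending bases k..2, collecting the digits least-significant-first and emitting the partition in reverse.
import Mathlib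
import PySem

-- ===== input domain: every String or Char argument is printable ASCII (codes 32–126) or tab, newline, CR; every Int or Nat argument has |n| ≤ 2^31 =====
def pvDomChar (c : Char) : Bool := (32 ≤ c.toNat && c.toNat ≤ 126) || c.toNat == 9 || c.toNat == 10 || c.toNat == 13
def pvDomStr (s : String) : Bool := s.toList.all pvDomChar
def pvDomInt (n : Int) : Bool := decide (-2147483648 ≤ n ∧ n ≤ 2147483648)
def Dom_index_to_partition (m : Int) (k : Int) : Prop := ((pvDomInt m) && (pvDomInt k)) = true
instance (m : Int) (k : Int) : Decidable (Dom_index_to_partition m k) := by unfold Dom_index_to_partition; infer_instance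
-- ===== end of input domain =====

-- B replaces A's per-step factorial-quotient divisions and final sort by one successive-divmod
-- loop over the descending bases k..2, emitting the digits in reverse (objective: faster).

-- ===== PORT A =====
def pvFactNat : Nat → Nat
  | 0 => 1
  | n + 1 => (n + 1) * pvFactNat n

-- math.factorial(n); exact for n ≥ 0 (for n < 0 Python raises ValueError — excluded by Pre_)
def pyFactorial (n : Int) : Int := (pvFactNat n.toNat : Int)

-- tuple(sorted((x for x in p if x > 0), reverse=True))
def pvNormalize (p : List Int) : List Int :=
  PySem.List.sorted (p.filter (fun x => decide (0 < x))) (fun x => x) true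

def index_to_partition (m : Int) (k : Int) : List Int :=
  if m = 0 then []
  else
    let n := PySem.Int.mod m (pyFactorial k)
    let A : List Int := PySem.List.pyRepeat [0] (k + 1)
    match (PySem.List.pyRange 1 k 1).foldl
      (fun (st : List Int × Int) i =>
        let z := PySem.Int.floordiv (pyFactorial k) (pyFactorial (i + 1))
        -- A[i+1] = n // z : index i+1 ∈ [2, k] is always in range, so List.set is exact
        (st.1.set (i + 1).toNat (PySem.Int.floordiv st.2 z), PySem.Int.mod st.2 z))
      (A, n) with
    | (Aarr, _) =>
      pvNormalize ((PySem.List.pyRange 1 (k + 1) 1).foldl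
        (fun acc i => acc ++ PySem.List.pyRepeat [k - i + 1] (PySem.List.pyGetD Aarr i 0))
        [])

-- ===== PORT B =====
def index_to_partition_alt (m : Int) (k : Int) : List Int :=
  if m = 0 then []
  else
    let n := PySem.Int.mod m (pyFactorial k)
    let st := (PySem.List.pyRange k 1 (-1)).foldl
      (fun (st : Int × List (Int × Int)) base =>
        (PySem.Int.floordiv st.1 base, st.2 ++ [(k - base + 1, PySem.Int.mod st.1 base)]))
      (n, [])
    st.2.reverse.foldl (fun acc sc => acc ++ PySem.List.pyRepeat [sc.1] sc.2) []

-- ===== PRECONDITION & SPEC =====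
-- A raises ValueError (factorial of a negative) exactly when m ≠ 0 and k < 0; B raises there too.
def Pre_index_to_partition (m : Int) (k : Int) : Prop := m = 0 ∨ 0 ≤ k
instance (m : Int) (k : Int) : Decidable (Pre_index_to_partition m k) := by
  unfold Pre_index_to_partition; infer_instance

def pvWitness_index_to_partition : Int × Int := (5, 3)

def Spec_index_to_partition (m : Int) (k : Int) (out : List Int) : Prop := out = index_to_partition_alt m k
instance (m : Int) (k : Int) (out : List Int) : Decidable (Spec_index_to_partition m k out) := by
  unfold Spec_index_to_partition; infer_instance

-- ===== CLAIM (what is proved, stated in full; the proofs are below) =====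
def Claim_equal_index_to_partition : Prop := ∀ (m : Int) (k : Int), Dom_index_to_partition m k → Pre_index_to_partition m k → Spec_index_to_partition m k (index_to_partition m k)

-- ===== LEMMAS AND PROOFS =====

-- k!/j!  (for j ≤ k)
def pvF (kk j : Nat) : Nat := pvFactNat kk / pvFactNat j
-- the j-th mixed-radix digit of n0 (base j at weight k!/j!)
def pvD (n0 kk j : Nat) : Nat := n0 / pvF kk j % j
-- the decoded partition: for j = 2..k, pvD … j parts of size k - j + 1, largest first
def pvL (n0 kk : Nat) : List Int :=
  (List.range' 2 (kk - 1)).flatMap (fun j => List.replicate (pvD n0 kk j) ((kk : Int) - (j : Int) + 1))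

theorem pvFactNat_eq_factorial : ∀ n, pvFactNat n = Nat.factorial n := by
  intro n; induction n with
  | zero => rfl
  | succ n ih => simp [pvFactNat, Nat.factorial, ih]

theorem pvFactNat_pos (n : Nat) : 0 < pvFactNat n := by
  rw [pvFactNat_eq_factorial]; exact Nat.factorial_pos n

theorem pvFact_dvd {j kk : Nat} (h : j ≤ kk) : pvFactNat j ∣ pvFactNat kk := by
  rw [pvFactNat_eq_factorial, pvFactNat_eq_factorial]
  exact Nat.factorial_dvd_factorial h

theorem pvF_pos {j kk : Nat} (h : j ≤ kk) : 0 < pvF kk j :=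
  Nat.div_pos (Nat.le_of_dvd (pvFactNat_pos kk) (pvFact_dvd h)) (pvFactNat_pos j)

theorem pvF_self (kk : Nat) : pvF kk kk = 1 := by
  simp [pvF, Nat.div_self (pvFactNat_pos kk)]

theorem pvF_succ_mul {j kk : Nat} (h1 : 1 ≤ j) (h2 : j ≤ kk) :
    pvF kk j * j = pvF kk (j - 1) := by
  obtain ⟨i, rfl⟩ : ∃ i, j = i + 1 := ⟨j - 1, by omega⟩
  have hfk : pvF kk (i + 1) * pvFactNat (i + 1) = pvFactNat kk :=
    Nat.div_mul_cancel (pvFact_dvd h2)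
  have hstep : pvFactNat (i + 1) = (i + 1) * pvFactNat i := rfl
  have hkk : pvFactNat kk = pvF kk (i + 1) * (i + 1) * pvFactNat i := by
    rw [← hfk, hstep]; ring
  show pvF kk (i + 1) * (i + 1) = pvF kk (i + 1 - 1)
  have hred : pvF kk (i + 1 - 1) = pvFactNat kk / pvFactNat i := rfl
  rw [hred, hkk]
  exact (Nat.mul_div_cancel _ (pvFactNat_pos i)).symm

theorem pvF_dvd_pvF {i j kk : Nat} (hij : i ≤ j) (hk : j ≤ kk) : pvF kk j ∣ pvF kk i := by
  have hd : pvFactNat i ∣ pvFactNat j := pvFact_dvd hij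
  have hfk : pvF kk j * pvFactNat j = pvFactNat kk := Nat.div_mul_cancel (pvFact_dvd hk)
  refine ⟨pvFactNat j / pvFactNat i, ?_⟩
  rw [pvF, ← hfk, Nat.mul_div_assoc _ hd]

theorem pv_div_mod (n y b : Nat) (hy : 0 < y) (hb : 0 < b) :
    n / y % b = n % (y * b) / y := by
  conv_lhs => rw [← Nat.mod_add_div n (y * b)]
  rw [Nat.mul_assoc, Nat.add_mul_div_left _ _ hy, Nat.add_mul_mod_self_left]
  refine Nat.mod_eq_of_lt ((Nat.div_lt_iff_lt_mul hy).2 ?_)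
  rw [Nat.mul_comm b y]
  exact Nat.mod_lt n (Nat.mul_pos hy hb)

-- A-side digit form equals pvD
theorem pvD_eq_A_digit {n0 kk j : Nat} (h1 : 2 ≤ j) (h2 : j ≤ kk) :
    pvD n0 kk j = n0 % pvF kk (j - 1) / pvF kk j := by
  rw [pvD, pv_div_mod n0 (pvF kk j) j (pvF_pos h2) (by omega),
    pvF_succ_mul (by omega) h2]

-- common facts about n0 = m % factorial(k)
theorem pv_n0_facts (m k : Int) (_hk : 0 ≤ k) :
    PySem.Int.mod m (pyFactorial k) = ((PySem.Int.mod m (pyFactorial k)).toNat : Int) ∧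
    (PySem.Int.mod m (pyFactorial k)).toNat < pvFactNat k.toNat := by
  have hpos : (0 : Int) < pyFactorial k := by
    unfold pyFactorial; exact_mod_cast pvFactNat_pos k.toNat
  have h1 := PySem.Int.mod_nonneg m hpos
  have h2 := PySem.Int.mod_lt m hpos
  unfold pyFactorial at h1 h2 ⊢
  omega

theorem pv_map_range_congr {α : Type} (n : Nat) (f g : Nat → α)
    (h : ∀ s, s < n → f s = g s) : (List.range n).map f = (List.range n).map g :=
  List.map_congr_left (fun a ha => h a (List.mem_range.mp ha))

theorem pv_rev_range (n : Nat) :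
    (List.range n).reverse = (List.range n).map (fun s => n - 1 - s) := by
  conv_lhs => rw [List.range_eq_range']
  rw [List.reverse_range']
  simp

-- the B-side fold: after t steps (bases kk, kk-1, …, kk-t+1)
theorem pv_Bloop (n0 kk : Nat) (_hlt : n0 < pvFactNat kk) :
    ∀ t, t ≤ kk - 1 →
    ((List.range t).map (fun s : Nat => (kk : Int) - (s : Int))).foldl
      (fun (st : Int × List (Int × Int)) base =>
        (PySem.Int.floordiv st.1 base, st.2 ++ [((kk : Int) - base + 1, PySem.Int.mod st.1 base)]))
      ((n0 : Int), [])
    = ((↑(n0 / pvF kk (kk - t)) : Int),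
       (List.range t).map (fun s : Nat => ((s : Int) + 1, (pvD n0 kk (kk - s) : Int)))) := by
  intro t ht
  induction t with
  | zero => simp [pvF_self kk]
  | succ t ih =>
    have ht' : t ≤ kk - 1 := by omega
    have hbk : kk - t ≤ kk := by omega
    rw [List.range_succ, List.map_append, List.foldl_append, ih ht', List.map_append]
    have hcast : (kk : Int) - (t : Int) = ((kk - t : Nat) : Int) := by omega
    simp only [List.map_cons, List.map_nil, List.foldl_cons, List.foldl_nil, hcast,
      PySem.Int.floordiv_natCast, PySem.Int.mod_natCast]
    refine Prod.ext ?_ ?_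
    · show ((n0 / pvF kk (kk - t) / (kk - t) : Nat) : Int) = ((n0 / pvF kk (kk - (t + 1)) : Nat) : Int)
      congr 1
      rw [Nat.div_div_eq_div_mul, pvF_succ_mul (by omega) hbk]
      have e : kk - t - 1 = kk - (t + 1) := by omega
      rw [e]
    · show _ ++ [((kk : Int) - ((kk - t : Nat) : Int) + 1, ((n0 / pvF kk (kk - t) % (kk - t) : Nat) : Int))] =
        _ ++ [((t : Int) + 1, ((pvD n0 kk (kk - t) : Nat) : Int))]
      have e1 : (kk : Int) - ((kk - t : Nat) : Int) + 1 = (t : Int) + 1 := by omega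
      rw [e1, pvD]

-- the emitted result of the B fold equals pvL
theorem pv_Bemit (n0 kk : Nat) :
    (((List.range (kk - 1)).map
        (fun s : Nat => ((s : Int) + 1, (pvD n0 kk (kk - s) : Int)))).reverse).foldl
      (fun acc sc => acc ++ PySem.List.pyRepeat [sc.1] sc.2) []
    = pvL n0 kk := by
  rw [PySem.List.foldl_append_eq_flatMap, List.nil_append, ← List.map_reverse,
    pv_rev_range, List.map_map, pvL, List.range'_eq_map_range,
    List.flatMap_def, List.flatMap_def, List.map_map, List.map_map]
  congr 1
  apply pv_map_range_congr
  intro s hs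
  simp only [Function.comp]
  rw [PySem.List.pyRepeat_singleton]
  have h1 : kk - 1 - 1 - s = kk - 2 - s := by omega
  have h2 : kk - (kk - 2 - s) = 2 + s := by omega
  rw [h1, h2]
  have h3 : ((kk - 2 - s : Nat) : Int) + 1 = (kk : Int) - ((2 + s : Nat) : Int) + 1 := by omega
  rw [h3]
  simp

theorem portB_eq (m k : Int) (hm : ¬ m = 0) (hk : 0 ≤ k) :
    index_to_partition_alt m k = pvL (PySem.Int.mod m (pyFactorial k)).toNat k.toNat := by
  obtain ⟨hcast, hlt⟩ := pv_n0_facts m k hk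
  set n0 := (PySem.Int.mod m (pyFactorial k)).toNat with hn0
  set kk := k.toNat with hkk
  have hkcast : k = (kk : Int) := by omega
  unfold index_to_partition_alt
  rw [if_neg hm]
  dsimp only
  rw [hcast, hkcast, PySem.List.pyRange_neg_one]
  have hr : ((kk : Int) - 1).toNat = kk - 1 := by omega
  rw [hr]
  rw [pv_Bloop n0 kk hlt (kk - 1) le_rfl]
  exact pv_Bemit n0 kk

theorem pv_mem_pvL {n0 kk : Nat} {x : Int} (hx : x ∈ pvL n0 kk) :
    ∃ j : Nat, 2 ≤ j ∧ j ≤ kk ∧ x = (kk : Int) - (j : Int) + 1 := by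
  unfold pvL at hx
  rw [List.mem_flatMap] at hx
  obtain ⟨j, hj, hxr⟩ := hx
  have hj' := List.mem_range'_1.mp hj
  exact ⟨j, by omega, by omega, List.eq_of_mem_replicate hxr⟩

theorem pv_pairwise_flatMap (l : List Nat) (c : Nat → Nat) (v : Nat → Int)
    (hmono : l.Pairwise (fun a b => v b ≤ v a)) :
    (l.flatMap (fun j => List.replicate (c j) (v j))).Pairwise (fun a b : Int => b ≤ a) := by
  induction l with
  | nil => simp
  | cons j rest ih =>
    rw [List.flatMap_cons, List.pairwise_append]
    refine ⟨List.pairwise_replicate.mpr (Or.inr le_rfl), ih hmono.of_cons, ?_⟩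
    intro a ha b hb
    rw [List.eq_of_mem_replicate ha]
    rw [List.mem_flatMap] at hb
    obtain ⟨j', hj', hb⟩ := hb
    rw [List.eq_of_mem_replicate hb]
    exact (List.pairwise_cons.mp hmono).1 j' hj'

theorem normalize_pvL (n0 kk : Nat) : pvNormalize (pvL n0 kk) = pvL n0 kk := by
  unfold pvNormalize
  have hfilter : (pvL n0 kk).filter (fun x => decide (0 < x)) = pvL n0 kk := by
    apply List.filter_eq_self.mpr
    intro a ha
    obtain ⟨j, h2j, hjk, rfl⟩ := pv_mem_pvL ha
    simp
    omega
  rw [hfilter]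
  apply PySem.List.sorted_rev_eq_self_of_pairwise
  unfold pvL
  apply pv_pairwise_flatMap
  apply List.Pairwise.imp ?_ (List.pairwise_lt_range' ..)
  intro a b hab
  have ha' : True := trivial
  omega

-- xs[j] for arr = [g 0, …, g (n-1)]
theorem pv_getD_map_range (g : Nat → Int) (n j : Nat) (hj : j < n) (d : Int) :
    PySem.List.pyGetD ((List.range n).map g) ((j : Int)) d = g j := by
  rw [PySem.List.pyGetD_natCast]
  rw [List.getD_eq_getElem _ _ (by simpa using hj)]
  simp

-- the A-side digit loop: after t steps (i = 1, …, t)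
theorem pv_Aloop (n0 kk : Nat) (hlt : n0 < pvFactNat kk) :
    ∀ t, t ≤ kk - 1 →
    ((List.range t).map (fun s : Nat => (1 : Int) + (s : Int))).foldl
      (fun (st : List Int × Int) i =>
        (st.1.set (i + 1).toNat
          (PySem.Int.floordiv st.2 (PySem.Int.floordiv (pyFactorial (kk : Int)) (pyFactorial (i + 1)))),
         PySem.Int.mod st.2 (PySem.Int.floordiv (pyFactorial (kk : Int)) (pyFactorial (i + 1)))))
      (List.replicate (kk + 1) 0, (n0 : Int))
    = ((List.range (kk + 1)).map
        (fun j => if 2 ≤ j ∧ j ≤ t + 1 then ((pvD n0 kk j : Nat) : Int) else 0),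
       ((n0 % pvF kk (t + 1) : Nat) : Int)) := by
  intro t ht
  induction t with
  | zero =>
    refine Prod.ext ?_ ?_
    · show List.replicate (kk + 1) 0 = _
      symm
      rw [pv_map_range_congr (kk + 1) _ (fun _ => (0 : Int)) (by intro s hs; simp; omega)]
      simp [List.map_const']
    · show ((n0 : Nat) : Int) = _
      have h1 : pvF kk 1 = pvFactNat kk := by
        show pvFactNat kk / pvFactNat 1 = pvFactNat kk
        simp [pvFactNat]
      rw [h1, Nat.mod_eq_of_lt hlt]
  | succ t ih =>
    have ht' : t ≤ kk - 1 := by omega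
    have h2k : t + 2 ≤ kk := by omega
    rw [List.range_succ, List.map_append, List.foldl_append, ih ht']
    simp only [List.map_cons, List.map_nil, List.foldl_cons, List.foldl_nil]
    have hz : PySem.Int.floordiv (pyFactorial (kk : Int)) (pyFactorial ((1 : Int) + (t : Int) + 1))
        = ((pvF kk (t + 2) : Nat) : Int) := by
      have e1 : ((1 : Int) + (t : Int) + 1) = ((t + 2 : Nat) : Int) := by omega
      rw [e1]
      unfold pyFactorial
      simp only [Int.toNat_natCast]
      rw [PySem.Int.floordiv_natCast]
      rfl
    have hidx : ((1 : Int) + (t : Int) + 1).toNat = t + 2 := by omega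
    rw [hz, hidx]
    rw [PySem.Int.floordiv_natCast, PySem.Int.mod_natCast]
    refine Prod.ext ?_ ?_
    · show List.set _ (t + 2) _ = _
      have hval : n0 % pvF kk (t + 1) / pvF kk (t + 2) = pvD n0 kk (t + 2) := by
        rw [pvD_eq_A_digit (by omega) h2k]
        simp
      rw [hval]
      apply List.ext_getElem
      · simp
      · intro j hj1 hj2
        simp only [List.length_set, List.length_map, List.length_range] at hj1 hj2
        rw [List.getElem_set]
        by_cases hje : t + 2 = j
        · subst hje
          rw [if_pos rfl]
          simp only [List.getElem_map, List.getElem_range]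
          rw [if_pos (by omega)]
        · rw [if_neg hje]
          simp only [List.getElem_map, List.getElem_range]
          by_cases hc : 2 ≤ j ∧ j ≤ t + 1
          · rw [if_pos hc, if_pos (by omega)]
          · rw [if_neg hc, if_neg (by omega)]
    · show ((n0 % pvF kk (t + 1) % pvF kk (t + 2) : Nat) : Int) = _
      congr 1
      exact Nat.mod_mod_of_dvd n0 (pvF_dvd_pvF (by omega) h2k)

-- the A-side parts loop (kk ≥ 1) equals pvL
theorem pv_Aparts (n0 kk : Nat) (hkk : 1 ≤ kk) :
    (PySem.List.pyRange 1 ((kk : Int) + 1) 1).foldl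
      (fun acc i => acc ++ PySem.List.pyRepeat [(kk : Int) - i + 1]
        (PySem.List.pyGetD ((List.range (kk + 1)).map
          (fun j => if 2 ≤ j ∧ j ≤ kk then ((pvD n0 kk j : Nat) : Int) else 0)) i 0)) []
    = pvL n0 kk := by
  rw [PySem.List.foldl_append_eq_flatMap, List.nil_append, PySem.List.pyRange_one]
  have h1 : ((kk : Int) + 1 - 1).toNat = kk := by omega
  rw [h1]
  obtain ⟨kk', rfl⟩ : ∃ kk', kk = kk' + 1 := ⟨kk - 1, by omega⟩
  set arr := (List.range (kk' + 1 + 1)).map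
      (fun j => if 2 ≤ j ∧ j ≤ kk' + 1 then ((pvD n0 (kk' + 1) j : Nat) : Int) else 0) with harr
  rw [List.range_succ_eq_map, List.map_cons, List.flatMap_cons]
  have hfst : PySem.List.pyGetD arr ((1 : Int) + ((0 : Nat) : Int)) 0 = 0 := by
    have e : (1 : Int) + ((0 : Nat) : Int) = ((1 : Nat) : Int) := by omega
    rw [e, harr, pv_getD_map_range _ _ _ (by omega)]
    simp
  rw [hfst]
  have hrep0 : PySem.List.pyRepeat [((kk' + 1 : Nat) : Int) - ((1 : Int) + ((0 : Nat) : Int)) + 1] (0 : Int) = [] := by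
    rw [PySem.List.pyRepeat_singleton]
    rfl
  rw [hrep0, List.nil_append, List.map_map, List.flatMap_def, List.map_map]
  unfold pvL
  rw [List.range'_eq_map_range, List.flatMap_def, List.map_map]
  simp only [Nat.add_sub_cancel]
  congr 1
  apply pv_map_range_congr
  intro s hs
  simp only [Function.comp]
  have e1 : (1 : Int) + ((Nat.succ s : Nat) : Int) = ((s + 2 : Nat) : Int) := by
    push_cast
    omega
  rw [e1, harr, pv_getD_map_range _ _ _ (by omega)]
  rw [if_pos (by omega)]
  rw [PySem.List.pyRepeat_singleton]
  simp only [Int.toNat_natCast]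
  have e2 : 2 + s = s + 2 := by omega
  rw [e2]

theorem portA_eq (m k : Int) (hm : ¬ m = 0) (hk : 0 ≤ k) :
    index_to_partition m k = pvNormalize (pvL (PySem.Int.mod m (pyFactorial k)).toNat k.toNat) := by
  obtain ⟨hcast, hlt⟩ := pv_n0_facts m k hk
  set n0 := (PySem.Int.mod m (pyFactorial k)).toNat with hn0
  set kk := k.toNat with hkk
  have hkcast : k = (kk : Int) := by omega
  unfold index_to_partition
  rw [if_neg hm]
  dsimp only
  rw [hcast, hkcast]
  congr 1
  rw [PySem.List.pyRepeat_singleton]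
  have hA0 : ((kk : Int) + 1).toNat = kk + 1 := by omega
  rw [hA0]
  rw [PySem.List.pyRange_one]
  have hr1 : ((kk : Int) - 1).toNat = kk - 1 := by omega
  rw [hr1]
  rw [pv_Aloop n0 kk hlt (kk - 1) le_rfl]
  dsimp only
  by_cases hkk0 : kk = 0
  · rw [hkk0]
    rw [PySem.List.pyRange_one]
    norm_num
    unfold pvL
    rfl
  · have hkk1 : 1 ≤ kk := by omega
    have hcond : (fun j => if 2 ≤ j ∧ j ≤ kk - 1 + 1 then ((pvD n0 kk j : Nat) : Int) else 0)
        = (fun j => if 2 ≤ j ∧ j ≤ kk then ((pvD n0 kk j : Nat) : Int) else 0) := by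
      funext j
      have e : kk - 1 + 1 = kk := by omega
      rw [e]
    rw [hcond]
    exact pv_Aparts n0 kk hkk1

-- ===== VERDICT (by name: the statement is the Claim_ definition above) =====
theorem index_to_partition_spec : Claim_equal_index_to_partition := by
  intro m k _ hpre
  unfold Spec_index_to_partition
  by_cases hm : m = 0
  · simp [index_to_partition, index_to_partition_alt, hm]
  · have hk : 0 ≤ k := hpre.resolve_left hm
    rw [portA_eq m k hm hk, portB_eq m k hm hk, normalize_pvL]
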